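-- pv_equiv track=rewrite | github.com/danneboii206/python-bth | kmom05/marvin4/marvin2.py | calculate_luhna_sum
-- ===== SOURCE A (Python) =====
-- def calculate_luhna_sum(text):
--     '''
--     Luhnalalgorithm to help in the creation of a ssn
--     '''
--     total = 0
--     i = 2
--     for number in text:
--         if number == "-":
--             continue
--         if i % 2 == 0:
--             ind_num = int(number) * 2
--             if ind_num > 9:
--                 for num in str(ind_num):
--                     total += int(num)
--             else:
--                 total += (int(number) * 2)
--         else:
--             total += int(number)
--         i += 1
--     return total
-- ===== SOURCE B (Python) =====
-- def calculate_luhna_sum(text):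
--     '''
--     Luhn-style digit sum: extract the digits once, then consume them two at a
--     time (doubled position, raw position), replacing the nested digit-sum loop
--     with the closed form d*2 - 9.
--     '''
--     digits = [int(c) for c in text if c != '-']
--     n = len(digits)
--     total = 0
--     k = 0
--     while k < n:
--         d = digits[k]
--         total += d * 2 - 9 if d > 4 else d * 2
--         if k + 1 < n:
--             total += digits[k + 1]
--         k += 2
--     return total
-- ===== Notes on version B (the rewrite author's own statement) =====
-- stated objective: simpler
-- what changed: B extracts the digit list once with a comprehension, then a single while-loop consumes two digits per step, replacing A's parity counter i and the nested str/int digit-sum loop with the closed form d*2 - 9.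
import Mathlib
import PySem

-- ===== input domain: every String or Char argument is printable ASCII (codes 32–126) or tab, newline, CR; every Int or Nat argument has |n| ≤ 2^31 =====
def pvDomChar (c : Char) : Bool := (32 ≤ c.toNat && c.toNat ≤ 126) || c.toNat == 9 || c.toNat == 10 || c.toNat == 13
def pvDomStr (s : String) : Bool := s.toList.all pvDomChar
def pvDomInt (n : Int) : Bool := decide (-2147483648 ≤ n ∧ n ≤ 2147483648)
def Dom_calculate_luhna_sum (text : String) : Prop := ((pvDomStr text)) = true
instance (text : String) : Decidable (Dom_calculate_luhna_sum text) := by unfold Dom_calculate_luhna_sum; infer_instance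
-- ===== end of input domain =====

-- B extracts the digits once and sums them two at a time with the closed form
-- d*2 - 9, replacing A's parity counter and nested digit-sum loop (objective: simpler).


-- ===== PORT A =====
-- one step of A's for-loop; state = (total, i); none = a ValueError from int(number)
def pvStepA (st : Option (Int × Int)) (c : Char) : Option (Int × Int) :=
  match st with
  | none => none
  | some (total, i) =>
    if c = '-' then some (total, i)
    else
      match PySem.Int.ofChars? [c] with
      | none => none
      | some n =>
        if PySem.Int.mod i 2 = 0 then
          let ind := n * 2
          if ind > 9 then
            -- inner loop 'for num in str(ind_num)': ind is 10..18 here, every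
            -- char of str(ind) is a digit, so this int() never raises
            some ((PySem.Int.toChars ind).foldl
                    (fun t ch => t + (PySem.Int.ofChars? [ch]).getD 0) total, i + 1)
          else some (total + n * 2, i + 1)
        else some (total + n, i + 1)

def calculate_luhna_sum (text : String) : Int :=
  match text.toList.foldl pvStepA (some (0, 2)) with
  | some (total, _) => total
  | none => 0   -- unreachable under Pre_ (Python raises ValueError)

-- ===== PORT B =====
-- digits = [int(c) for c in text if c != '-']; none = a ValueError
def pvDigits? (text : String) : Option (List Int) :=
  (text.toList.filter (fun c => c ≠ '-')).mapM (fun c => PySem.Int.ofChars? [c])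

-- the while-loop of B: consume two digits per iteration
def pvPairLoop (digits : List Int) (n : Int) (total : Int) (k : Int) : Int :=
  if h : k < n then
    let d := PySem.List.pyGetD digits k 0
    let total1 := total + (if d > 4 then d * 2 - 9 else d * 2)
    let total2 := if k + 1 < n then total1 + PySem.List.pyGetD digits (k + 1) 0 else total1
    pvPairLoop digits n total2 (k + 2)
  else total
termination_by (n - k).toNat
decreasing_by omega

def calculate_luhna_sum_alt (text : String) : Int :=
  match pvDigits? text with
  | some digits => pvPairLoop digits digits.length 0 0
  | none => 0   -- unreachable under Pre_

-- ===== PRECONDITION & SPEC =====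
-- Pre_ excludes exactly the inputs on which A raises ValueError: any character
-- other than '-' or an ASCII digit makes int(c) raise.
def Pre_calculate_luhna_sum (text : String) : Prop :=
  (text.toList.all (fun c => ['-', '0', '1', '2', '3', '4', '5', '6', '7', '8', '9'].contains c)) = true
instance (text : String) : Decidable (Pre_calculate_luhna_sum text) := by
  unfold Pre_calculate_luhna_sum; infer_instance

def pvWitness_calculate_luhna_sum : String := "1-9"

def Spec_calculate_luhna_sum (text : String) (out : Int) : Prop := out = calculate_luhna_sum_alt text
instance (text : String) (out : Int) : Decidable (Spec_calculate_luhna_sum text out) := by unfold Spec_calculate_luhna_sum; infer_instance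

-- ===== CLAIM (what is proved, stated in full; the proofs are below) =====
def Claim_equal_calculate_luhna_sum : Prop := ∀ (text : String), Dom_calculate_luhna_sum text → Pre_calculate_luhna_sum text → Spec_calculate_luhna_sum text (calculate_luhna_sum text)

-- ===== LEMMAS AND PROOFS =====

-- value of a digit character (proof-side abbreviation)
def pvCharVal (c : Char) : Int := (PySem.Int.ofChars? [c]).getD 0

-- the digit values A/B both work on
def pvVals (cs : List Char) : List Int := (cs.filter (fun c => c ≠ '-')).map pvCharVal

-- alternating reference sum: flag true = this position is doubled
def pvAux : Bool → List Int → Int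
  | _, [] => 0
  | true, d :: rest => (if d > 4 then d * 2 - 9 else d * 2) + pvAux false rest
  | false, d :: rest => d + pvAux true rest

theorem pvMod2_succ (i : Int) :
    (decide (PySem.Int.mod (i + 1) 2 = 0)) = !(decide (PySem.Int.mod i 2 = 0)) := by
  simp only [PySem.Int.mod_eq_emod_of_pos (by omega : (0:Int) < 2)]
  by_cases h : i % 2 = 0 <;> simp [h] <;> omega

-- inner digit-sum loop of A computes the closed form d*2 - 9 for d in 5..9
theorem pvInner (d total : Int) (h5 : 5 ≤ d) (h9 : d ≤ 9) :
    (PySem.Int.toChars (d * 2)).foldl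
      (fun t ch => t + (PySem.Int.ofChars? [ch]).getD 0) total = total + (d * 2 - 9) := by
  interval_cases d
  · rw [show PySem.Int.toChars (5 * 2) = ['1', '0'] from by decide]
    simp [List.foldl, show (PySem.Int.ofChars? ['1']).getD 0 = 1 from by decide,
      show (PySem.Int.ofChars? ['0']).getD 0 = 0 from by decide]
  · rw [show PySem.Int.toChars (6 * 2) = ['1', '2'] from by decide]
    simp [List.foldl, show (PySem.Int.ofChars? ['1']).getD 0 = 1 from by decide,
      show (PySem.Int.ofChars? ['2']).getD 0 = 2 from by decide]; ring
  · rw [show PySem.Int.toChars (7 * 2) = ['1', '4'] from by decide]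
    simp [List.foldl, show (PySem.Int.ofChars? ['1']).getD 0 = 1 from by decide,
      show (PySem.Int.ofChars? ['4']).getD 0 = 4 from by decide]; ring
  · rw [show PySem.Int.toChars (8 * 2) = ['1', '6'] from by decide]
    simp [List.foldl, show (PySem.Int.ofChars? ['1']).getD 0 = 1 from by decide,
      show (PySem.Int.ofChars? ['6']).getD 0 = 6 from by decide]; ring
  · rw [show PySem.Int.toChars (9 * 2) = ['1', '8'] from by decide]
    simp [List.foldl, show (PySem.Int.ofChars? ['1']).getD 0 = 1 from by decide,
      show (PySem.Int.ofChars? ['8']).getD 0 = 8 from by decide]; ring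

-- every admitted character is '-' or a digit whose int() value is pvCharVal
theorem pvCharCases (c : Char)
    (hc : c ∈ ['-', '0', '1', '2', '3', '4', '5', '6', '7', '8', '9']) :
    c = '-' ∨ (PySem.Int.ofChars? [c] = some (pvCharVal c) ∧
      0 ≤ pvCharVal c ∧ pvCharVal c ≤ 9) := by
  fin_cases hc <;> first | (left; rfl) | (right; refine ⟨by decide, by decide, by decide⟩)

theorem pvStepA_digit (c : Char) (total i : Int)
    (hv : PySem.Int.ofChars? [c] = some (pvCharVal c))
    (h0 : 0 ≤ pvCharVal c) (h9 : pvCharVal c ≤ 9) :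
    pvStepA (some (total, i)) c =
      some (total + (if PySem.Int.mod i 2 = 0 then
              (if pvCharVal c > 4 then pvCharVal c * 2 - 9 else pvCharVal c * 2)
            else pvCharVal c), i + 1) := by
  have hne : ¬ (c = '-') := by
    rintro rfl
    rw [show PySem.Int.ofChars? ['-'] = none from by decide] at hv
    simp at hv
  by_cases hp : PySem.Int.mod i 2 = 0
  · by_cases hbig : pvCharVal c > 4
    · simp only [pvStepA, if_neg hne, hv, if_pos hp,
        if_pos (show pvCharVal c * 2 > 9 by omega), if_pos hbig]
      rw [pvInner (pvCharVal c) total (by omega) h9]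
    · simp only [pvStepA, if_neg hne, hv, if_pos hp,
        if_neg (show ¬ pvCharVal c * 2 > 9 by omega), if_neg hbig]
  · simp only [pvStepA, if_neg hne, hv, if_neg hp]

theorem pvFoldA_eq (cs : List Char)
    (hv : ∀ c ∈ cs, c ∈ ['-', '0', '1', '2', '3', '4', '5', '6', '7', '8', '9']) :
    ∀ (total i : Int),
      cs.foldl pvStepA (some (total, i)) =
        some (total + pvAux (decide (PySem.Int.mod i 2 = 0)) (pvVals cs),
              i + (cs.filter (fun c => c ≠ '-')).length) := by
  induction cs with
  | nil => intro total i; simp [pvVals, pvAux]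
  | cons c cs ih =>
    intro total i
    have hrest : ∀ x ∈ cs, x ∈ ['-', '0', '1', '2', '3', '4', '5', '6', '7', '8', '9'] :=
      fun x hx => hv x (List.mem_cons_of_mem _ hx)
    rcases pvCharCases c (hv c (List.mem_cons_self ..)) with rfl | ⟨h1, h2, h3⟩
    · rw [List.foldl_cons, show pvStepA (some (total, i)) '-' = some (total, i) from rfl,
        ih hrest total i]
      simp [pvVals]
    · have hne : ¬ (c = '-') := by
        rintro rfl
        rw [show PySem.Int.ofChars? ['-'] = none from by decide] at h1
        simp at h1
      rw [List.foldl_cons, pvStepA_digit c total i h1 h2 h3, ih hrest _ (i + 1)]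
      have hvals : pvVals (c :: cs) = pvCharVal c :: pvVals cs := by
        simp [pvVals, hne]
      have hlen : ((c :: cs).filter (fun x => x ≠ '-')).length
          = (cs.filter (fun x => x ≠ '-')).length + 1 := by
        simp [hne]
      rw [hvals, hlen, pvMod2_succ i]
      by_cases hp : PySem.Int.mod i 2 = 0
      · rw [if_pos hp]
        simp only [hp, decide_true, Bool.not_true, pvAux, Option.some.injEq, Prod.mk.injEq]
        exact ⟨by ring, by push_cast; ring⟩
      · rw [if_neg hp]
        simp only [hp, decide_false, Bool.not_false, pvAux, Option.some.injEq, Prod.mk.injEq]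
        exact ⟨by ring, by push_cast; ring⟩

theorem pvMapM_eq (cs : List Char)
    (hv : ∀ c ∈ cs, c ∈ ['-', '0', '1', '2', '3', '4', '5', '6', '7', '8', '9']) :
    (cs.filter (fun c => c ≠ '-')).mapM (fun c => PySem.Int.ofChars? [c]) =
      some (pvVals cs) := by
  induction cs with
  | nil => rfl
  | cons c cs ih =>
    have hrest : ∀ x ∈ cs, x ∈ ['-', '0', '1', '2', '3', '4', '5', '6', '7', '8', '9'] :=
      fun x hx => hv x (List.mem_cons_of_mem _ hx)
    rcases pvCharCases c (hv c (List.mem_cons_self ..)) with rfl | ⟨h1, _, _⟩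
    · simpa [pvVals] using ih hrest
    · have hne : ¬ (c = '-') := by
        rintro rfl
        rw [show PySem.Int.ofChars? ['-'] = none from by decide] at h1
        simp at h1
      have hrec := ih hrest
      simp only [pvVals, ne_eq, decide_not] at hrec ⊢
      simp [hne, List.mapM_cons, h1, hrec]

theorem pvPairLoop_eq (ds : List Int) :
    ∀ (j m : Nat) (total : Int), ds.length ≤ m + j →
      pvPairLoop ds ds.length total (m : Int) = total + pvAux true (ds.drop m) := by
  intro j
  induction j with
  | zero =>
    intro m total hle
    rw [pvPairLoop, dif_neg (by exact_mod_cast not_lt.mpr (by exact_mod_cast hle))]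
    rw [List.drop_eq_nil_of_le (by omega : ds.length ≤ m)]
    simp [pvAux]
  | succ j ih =>
    intro m total hle
    by_cases hm : m < ds.length
    · rw [pvPairLoop, dif_pos (by exact_mod_cast hm)]
      dsimp only
      have hget : PySem.List.pyGetD ds (m : Int) 0 = ds.getD m 0 :=
        PySem.List.pyGetD_natCast ds m 0
      have hdrop : ds.drop m = ds.getD m 0 :: ds.drop (m + 1) := by
        rw [List.getD_eq_getElem ds 0 hm]
        exact (List.getElem_cons_drop hm).symm
      by_cases hm1 : m + 1 < ds.length
      · have hget1 : PySem.List.pyGetD ds ((m : Int) + 1) 0 = ds.getD (m + 1) 0 := by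
          rw [show ((m : Int) + 1) = ((m + 1 : Nat) : Int) by push_cast; ring]
          exact PySem.List.pyGetD_natCast ds (m + 1) 0
        have hdrop1 : ds.drop (m + 1) = ds.getD (m + 1) 0 :: ds.drop (m + 2) := by
          rw [List.getD_eq_getElem ds 0 hm1]
          exact (List.getElem_cons_drop hm1).symm
        rw [if_pos (by exact_mod_cast hm1), hget, hget1]
        rw [show ((m : Int) + 2) = ((m + 2 : Nat) : Int) by push_cast; ring]
        rw [ih (m + 2) _ (by omega)]
        rw [hdrop, hdrop1]
        simp only [pvAux]
        ring
      · rw [if_neg (by exact_mod_cast hm1), hget]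
        rw [show ((m : Int) + 2) = ((m + 2 : Nat) : Int) by push_cast; ring]
        rw [ih (m + 2) _ (by omega)]
        rw [hdrop, List.drop_eq_nil_of_le (show ds.length ≤ m + 1 by omega)]
        rw [List.drop_eq_nil_of_le (show ds.length ≤ m + 2 by omega)]
        simp only [pvAux]
        ring
    · rw [pvPairLoop, dif_neg (by exact_mod_cast not_lt.mpr (by omega : ds.length ≤ m))]
      rw [List.drop_eq_nil_of_le (by omega)]
      simp [pvAux]

-- ===== VERDICT (by name: the statement is the Claim_ definition above) =====
theorem calculate_luhna_sum_spec : Claim_equal_calculate_luhna_sum := by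
  intro text _ hpre
  unfold Pre_calculate_luhna_sum at hpre
  simp only [List.all_eq_true, List.contains_eq_mem, decide_eq_true_eq] at hpre
  unfold Spec_calculate_luhna_sum calculate_luhna_sum calculate_luhna_sum_alt pvDigits?
  rw [pvFoldA_eq _ hpre 0 2, pvMapM_eq _ hpre]
  have h := pvPairLoop_eq (pvVals text.toList) (pvVals text.toList).length 0 0 (by omega)
  simp only [Nat.cast_zero, List.drop_zero] at h
  rw [show (decide (PySem.Int.mod 2 2 = 0)) = true from by decide]
  simp [h]
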